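-- pv_equiv track=rewrite | github.com/dliang2/AOC-2018 | day_2/ims.py | check
-- ===== SOURCE A (Python) =====
-- alpha = "abcdefghijklmnopqrstuvwxyz"
--
-- def check(input):
--     d = {"twice": 0, "thrice": 0}
--     for id in input:
--         for letter in alpha:
--             if id.count(letter) == 2:
--                 d["twice"] += 1
--                 break
--         for letter in alpha:
--             if id.count(letter) == 3:
--                 d["thrice"] += 1
--                 break
--     return d
-- ===== SOURCE B (Python) =====
-- alpha = "abcdefghijklmnopqrstuvwxyz"
--
-- def check(input):
--     d = {"twice": 0, "thrice": 0}
--     for id in input: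
--         s = sorted(c for c in id if c in alpha)
--         lens = []
--         i = 0
--         n = len(s)
--         while i < n:
--             j = i + 1
--             while j < n and s[j] == s[i]:
--                 j += 1
--             lens.append(j - i)
--             i = j
--         if 2 in lens:
--             d["twice"] += 1
--         if 3 in lens:
--             d["thrice"] += 1
--     return d
-- ===== Notes on version B (the rewrite author's own statement) =====
-- stated objective: faster
-- what changed: Instead of scanning the id once per alphabet letter (26 str.count passes per id, each with an early break), B filters the id to lowercase letters, sorts it once, and collects the run lengths of the sorted sequence in a single pass, then tests whether 2 (resp. 3) is among the run lengths.
import Mathlib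
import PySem

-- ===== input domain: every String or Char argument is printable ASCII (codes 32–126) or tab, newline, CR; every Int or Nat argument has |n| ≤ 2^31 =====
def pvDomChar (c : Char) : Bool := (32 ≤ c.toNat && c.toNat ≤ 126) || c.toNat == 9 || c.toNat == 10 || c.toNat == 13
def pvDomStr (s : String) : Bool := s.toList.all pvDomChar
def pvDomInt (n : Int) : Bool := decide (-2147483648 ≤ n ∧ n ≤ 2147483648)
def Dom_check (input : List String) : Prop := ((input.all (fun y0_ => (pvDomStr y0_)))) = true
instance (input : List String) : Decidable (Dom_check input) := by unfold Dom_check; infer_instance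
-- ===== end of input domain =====

-- B replaces A's 26 per-letter str.count scans (with early break) by sort-then-run-lengths of
-- the lowercase letters of each id; same results via one sort + single pass per id (measured faster in a timing run).

-- ===== PORT A =====
def pvAlpha : List Char := "abcdefghijklmnopqrstuvwxyz".toList

-- 'for letter in alpha: if id.count(letter) == n: …; break' — returns whether the break fired
def pvFindCount (id : String) (n : Nat) : List Char → Bool
  | [] => false
  | c :: rest =>
      if PySem.Str.count id (String.ofList [c]) = n then true else pvFindCount id n rest

def check (input : List String) : List (String × Int) :=
  let d : Int × Int :=
    input.foldl (fun d id =>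
      let d := if pvFindCount id 2 pvAlpha then (d.1 + 1, d.2) else d
      if pvFindCount id 3 pvAlpha then (d.1, d.2 + 1) else d) (0, 0)
  [("twice", d.1), ("thrice", d.2)]

-- ===== PORT B =====
-- run lengths of the maximal blocks of equal adjacent elements (B's nested while loops)
def pvRuns : List Char → List Nat
  | [] => []
  | c :: t => ((t.takeWhile (· == c)).length + 1) :: pvRuns (t.dropWhile (· == c))
  termination_by l => l.length
  decreasing_by simpa using Nat.lt_succ_of_le (List.length_dropWhile_le (· == c) t)

def check_alt (input : List String) : List (String × Int) :=
  let d : Int × Int :=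
    input.foldl (fun d id =>
      -- 'c in alpha' for the single character c is membership of c in alpha
      let lens := pvRuns (PySem.List.sorted (id.toList.filter (fun c => pvAlpha.contains c)) (fun c => c))
      ((if 2 ∈ lens then d.1 + 1 else d.1), (if 3 ∈ lens then d.2 + 1 else d.2))) (0, 0)
  [("twice", d.1), ("thrice", d.2)]

-- ===== PRECONDITION & SPEC =====
def Spec_check (input : List String) (out : List (String × Int)) : Prop := out = check_alt input
instance (input : List String) (out : List (String × Int)) : Decidable (Spec_check input out) := by unfold Spec_check; infer_instance

-- ===== CLAIM (what is proved, stated in full; the proofs are below) =====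
def Claim_equal_check : Prop := ∀ (input : List String), Dom_check input → Spec_check input (check input)

-- ===== LEMMAS AND PROOFS =====

-- Python str.count with a single-character needle is the character count
theorem count_go_singleton (c : Char) (l : List Char) (fuel acc : Nat) (h : l.length ≤ fuel) :
    PySem.Chars.count.go [c] fuel l acc = acc + l.count c := by
  induction l generalizing fuel acc with
  | nil => cases fuel <;> simp [PySem.Chars.count.go]
  | cons hd t ih =>
    cases fuel with
    | zero => simp at h
    | succ f =>
      have hf : t.length ≤ f := by simpa using Nat.le_of_succ_le_succ h
      rw [PySem.Chars.count.go]
      by_cases hc : c = hd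
      · subst hc
        simp only [List.isPrefixOf, BEq.rfl, Bool.and_true, if_true]
        rw [List.length_singleton, List.drop_one, List.tail_cons, ih f (acc + 1) hf]
        rw [List.count_cons_self]; omega
      · have hnp : ¬ ([c].isPrefixOf (hd :: t) = true) := by
          simp [List.isPrefixOf, beq_iff_eq]
          exact hc
        rw [if_neg hnp, ih f acc hf, List.count_cons_of_ne (Ne.symm hc)]

theorem count_singleton (s : List Char) (c : Char) :
    PySem.Chars.count s [c] = s.count c := by
  rw [PySem.Chars.count]
  simpa using count_go_singleton c s s.length 0 le_rfl

theorem strCount_singleton (id : String) (c : Char) :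
    PySem.Str.count id (String.ofList [c]) = id.toList.count c := by
  rw [PySem.Str.count_eq]
  simpa using count_singleton id.toList c

theorem findCount_iff (id : String) (n : Nat) (L : List Char) :
    pvFindCount id n L = true ↔ ∃ c ∈ L, id.toList.count c = n := by
  induction L with
  | nil => simp [pvFindCount]
  | cons c rest ih =>
    rw [pvFindCount]
    split_ifs with hc
    · rw [strCount_singleton] at hc
      simp only [true_iff]
      exact ⟨c, List.mem_cons_self, hc⟩
    · rw [strCount_singleton] at hc
      rw [ih]
      constructor
      · rintro ⟨x, hx, hn⟩; exact ⟨x, List.mem_cons_of_mem _ hx, hn⟩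
      · rintro ⟨x, hx, hn⟩
        rcases List.mem_cons.mp hx with rfl | hx
        · exact absurd hn hc
        · exact ⟨x, hx, hn⟩

-- run lengths of a ≤-sorted list are exactly the multiplicities of its elements
theorem runs_iff (l : List Char) (hs : l.Pairwise (· ≤ ·)) (n : Nat) :
    n ∈ pvRuns l ↔ ∃ c ∈ l, l.count c = n := by
  induction l using pvRuns.induct with
  | case1 => simp [pvRuns]
  | case2 c t ih =>
    have htw : ∀ x ∈ t.takeWhile (· == c), x = c := by
      intro x hx
      simpa [beq_iff_eq] using List.mem_takeWhile_imp hx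
    have hdrop_pw : (t.dropWhile (· == c)).Pairwise (· ≤ ·) :=
      hs.of_cons.sublist (List.dropWhile_sublist _)
    have hd_ne : ∀ x ∈ t.dropWhile (· == c), c < x := by
      intro x hx
      have hle : c ≤ x := (List.pairwise_cons.mp hs).1 x ((List.dropWhile_sublist _).subset hx)
      rcases lt_or_eq_of_le hle with h | h
      · exact h
      · exfalso
        cases hdw : t.dropWhile (· == c) with
        | nil => simp [hdw] at hx
        | cons h0 t0 =>
          have hh0 : ¬ h0 = c := by
            have := List.head?_dropWhile_not (· == c) t
            rw [hdw] at this; simpa using this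
          have hh0le : h0 ≤ x := by
            rcases List.mem_cons.mp (hdw ▸ hx) with rfl | hx0
            · exact le_rfl
            · exact (List.pairwise_cons.mp (hdw ▸ hdrop_pw)).1 x hx0
          have hch0 : c ≤ h0 :=
            (List.pairwise_cons.mp hs).1 h0
              ((List.dropWhile_sublist _).subset (hdw ▸ List.mem_cons_self))
          rw [← h] at hh0le
          exact hh0 (le_antisymm hh0le hch0)
    have hsplit : t = t.takeWhile (· == c) ++ t.dropWhile (· == c) :=
      (List.takeWhile_append_dropWhile).symm
    have hcount_head : (c :: t).count c = (t.takeWhile (· == c)).length + 1 := by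
      have h0 : t.count c = (t.takeWhile (· == c)).count c + (t.dropWhile (· == c)).count c := by
        conv_lhs => rw [hsplit]
        rw [List.count_append]
      have h1 : (t.takeWhile (· == c)).count c = (t.takeWhile (· == c)).length :=
        List.count_eq_length.mpr (fun x hx => by simpa [beq_iff_eq] using (htw x hx).symm)
      have h2 : (t.dropWhile (· == c)).count c = 0 :=
        List.count_eq_zero.mpr (fun hx => absurd rfl (hd_ne c hx).ne')
      rw [List.count_cons_self]; omega
    have hcount_rest : ∀ x ∈ t.dropWhile (· == c),
        (c :: t).count x = (t.dropWhile (· == c)).count x := by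
      intro x hx
      have hxc : x ≠ c := (hd_ne x hx).ne'
      have h0 : t.count x = (t.takeWhile (· == c)).count x + (t.dropWhile (· == c)).count x := by
        conv_lhs => rw [hsplit]
        rw [List.count_append]
      have h1 : (t.takeWhile (· == c)).count x = 0 :=
        List.count_eq_zero.mpr (fun hx' => hxc (htw x hx'))
      rw [List.count_cons_of_ne hxc.symm]; omega
    rw [pvRuns, List.mem_cons, ih hdrop_pw]
    constructor
    · rintro (rfl | ⟨x, hx, hn⟩)
      · exact ⟨c, List.mem_cons_self, by omega⟩
      · exact ⟨x, List.mem_cons_of_mem c ((List.dropWhile_sublist _).subset hx),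
          by rw [hcount_rest x hx]; exact hn⟩
    · rintro ⟨x, hx, hn⟩
      rcases List.mem_cons.mp hx with rfl | hx
      · left; omega
      · by_cases hxc : x = c
        · subst hxc; left; omega
        · right
          have hxd : x ∈ t.dropWhile (· == c) := by
            rw [hsplit] at hx
            rcases List.mem_append.mp hx with h | h
            · exact absurd (htw x h) hxc
            · exact h
          exact ⟨x, hxd, by rw [← hcount_rest x hxd]; exact hn⟩

-- per-id equivalence of A's break-loop test and B's run-length-membership test
theorem test_iff (id : String) (n : Nat) (hn : n ≠ 0) :
    (pvFindCount id n pvAlpha = true) ↔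
      n ∈ pvRuns (PySem.List.sorted (id.toList.filter (fun c => pvAlpha.contains c)) (fun c => c)) := by
  set f := id.toList.filter (fun c => pvAlpha.contains c) with hf
  set s := PySem.List.sorted f (fun c => c) with hsdef
  have hperm : s.Perm f := PySem.List.sorted_perm f (fun c => c) false
  have hpw : s.Pairwise (· ≤ ·) := PySem.List.sorted_pairwise f (fun c => c)
  rw [runs_iff s hpw n, findCount_iff]
  constructor
  · rintro ⟨c, hc, hcount⟩
    have hmemf : c ∈ f := by
      rw [hf, List.mem_filter]
      refine ⟨List.count_pos_iff.mp (by omega), by simpa using hc⟩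
    have hcf : f.count c = id.toList.count c := by
      rw [hf]; exact List.count_filter (by simpa using hc)
    exact ⟨c, hperm.mem_iff.mpr hmemf, by rw [hperm.count_eq, hcf]; exact hcount⟩
  · rintro ⟨c, hc, hcount⟩
    have hmemf : c ∈ f := hperm.mem_iff.mp hc
    have hca : c ∈ pvAlpha := by
      rw [hf, List.mem_filter] at hmemf; simpa using hmemf.2
    refine ⟨c, hca, ?_⟩
    rw [hperm.count_eq, hf, List.count_filter (by simpa using hca)] at hcount
    exact hcount

-- the two per-id fold steps are the same function
theorem step_eq :
    (fun (d : Int × Int) id =>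
      let d := if pvFindCount id 2 pvAlpha then (d.1 + 1, d.2) else d
      if pvFindCount id 3 pvAlpha then (d.1, d.2 + 1) else d) =
    (fun (d : Int × Int) id =>
      let lens := pvRuns (PySem.List.sorted (id.toList.filter (fun c => pvAlpha.contains c)) (fun c => c))
      ((if 2 ∈ lens then d.1 + 1 else d.1), (if 3 ∈ lens then d.2 + 1 else d.2))) := by
  funext d id
  simp only [← test_iff id 2 (by omega), ← test_iff id 3 (by omega)]
  by_cases h2 : pvFindCount id 2 pvAlpha = true <;>
    by_cases h3 : pvFindCount id 3 pvAlpha = true <;> simp [h2, h3]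

-- ===== VERDICT (by name: the statement is the Claim_ definition above) =====
theorem check_spec : Claim_equal_check := by
  intro input _
  unfold Spec_check check check_alt
  rw [step_eq]
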